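-- pv_equiv track=rewrite | github.com/ARobicsek/psalms-AI-analysis | scripts/statistical_analysis/enhanced_scorer.py | count_contiguous_phrases
-- ===== SOURCE A (Python) =====
-- from typing import Dict, List, Tuple, Optional
--
-- def count_contiguous_phrases(
--
--     shared_phrases: List[Dict]
-- ) -> Tuple[int, int, int]:
--     """
--     Count contiguous phrases by length.
--
--     Args:
--         shared_phrases: List of shared phrase dictionaries
--
--     Returns:
--         Tuple of (2-word count, 3-word count, 4+ word count)
--     """
--     count_2 = 0
--     count_3 = 0
--     count_4plus = 0
--
--     for phrase in shared_phrases: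
--         length = phrase.get('length', 0)
--         if length == 2:
--             count_2 += 1
--         elif length == 3:
--             count_3 += 1
--         elif length >= 4:
--             count_4plus += 1
--
--     return count_2, count_3, count_4plus
-- ===== SOURCE B (Python) =====
-- def count_contiguous_phrases(shared_phrases):
--     counts = {}
--     for phrase in shared_phrases:
--         k = phrase.get('length', 0)
--         counts[k] = counts.get(k, 0) + 1
--     return (counts.get(2, 0),
--             counts.get(3, 0),
--             sum(v for k, v in counts.items() if k >= 4))
-- ===== Notes on version B (the rewrite author's own statement) =====
-- stated objective: idiomatic
-- what changed: B tallies all phrase lengths into one frequency dict in a single pass, then reads the 2- and 3-counts from the table and sums the table's entries with key >= 4, instead of A's three separate if/elif-updated counters.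
import Mathlib
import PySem

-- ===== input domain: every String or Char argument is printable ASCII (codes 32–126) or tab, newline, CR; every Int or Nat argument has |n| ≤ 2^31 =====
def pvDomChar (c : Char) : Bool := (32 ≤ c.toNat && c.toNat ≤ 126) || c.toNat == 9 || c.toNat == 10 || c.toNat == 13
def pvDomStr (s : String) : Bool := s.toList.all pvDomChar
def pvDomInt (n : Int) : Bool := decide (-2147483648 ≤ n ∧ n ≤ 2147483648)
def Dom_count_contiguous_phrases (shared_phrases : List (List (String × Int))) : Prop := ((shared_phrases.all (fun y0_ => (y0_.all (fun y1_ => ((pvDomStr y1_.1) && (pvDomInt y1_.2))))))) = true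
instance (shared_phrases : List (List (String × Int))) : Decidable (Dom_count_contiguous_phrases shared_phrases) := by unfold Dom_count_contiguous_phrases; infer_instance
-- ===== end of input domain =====

-- B replaces A's three if/elif-updated counters by one frequency-dict tally pass plus
-- table lookups and an items sum for the 4+ bucket (objective: idiomatic; same cost).

-- ===== PORT A =====
-- A: single loop, three counters updated by an if/elif chain on phrase.get('length', 0).
def count_contiguous_phrases (shared_phrases : List (List (String × Int))) : Int × Int × Int :=
  let r := shared_phrases.foldl
    (fun (acc : Int × Int × Int) phrase =>
      let length := (PySem.Dict.mk phrase).getD "length" 0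
      if length == 2 then (acc.1 + 1, acc.2.1, acc.2.2)
      else if length == 3 then (acc.1, acc.2.1 + 1, acc.2.2)
      else if 4 ≤ length then (acc.1, acc.2.1, acc.2.2 + 1)
      else acc)
    (0, 0, 0)
  r

-- ===== PORT B =====
-- B: tally pass 'counts[k] = counts.get(k, 0) + 1', then lookups and a sum over items with k >= 4.
def count_contiguous_phrases_alt (shared_phrases : List (List (String × Int))) : Int × Int × Int :=
  let counts := shared_phrases.foldl
    (fun (d : PySem.Dict Int Int) phrase =>
      let k := (PySem.Dict.mk phrase).getD "length" 0
      d.insert k (d.getD k 0 + 1))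
    PySem.Dict.empty
  (counts.getD 2 0, counts.getD 3 0,
   counts.items.foldl (fun acc kv => if 4 ≤ kv.1 then acc + kv.2 else acc) 0)

-- ===== PRECONDITION & SPEC =====
def Spec_count_contiguous_phrases (shared_phrases : List (List (String × Int))) (out : Int × Int × Int) : Prop := out = count_contiguous_phrases_alt shared_phrases
instance (shared_phrases : List (List (String × Int))) (out : Int × Int × Int) : Decidable (Spec_count_contiguous_phrases shared_phrases out) := by unfold Spec_count_contiguous_phrases; infer_instance

-- ===== CLAIM (what is proved, stated in full; the proofs are below) =====
def Claim_equal_count_contiguous_phrases : Prop := ∀ (shared_phrases : List (List (String × Int))), Dom_count_contiguous_phrases shared_phrases → Spec_count_contiguous_phrases shared_phrases (count_contiguous_phrases shared_phrases)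

-- ===== LEMMAS AND PROOFS =====

-- the length of a phrase dict, as both ports read it
def pvLen (phrase : List (String × Int)) : Int := (PySem.Dict.mk phrase).getD "length" 0

-- A's loop computes (count of 2, count of 3, count of ≥4) over the mapped length list.
theorem pvAFold (sp : List (List (String × Int))) : ∀ (a b c : Int),
    sp.foldl
      (fun (acc : Int × Int × Int) phrase =>
        let length := (PySem.Dict.mk phrase).getD "length" 0
        if length == 2 then (acc.1 + 1, acc.2.1, acc.2.2)
        else if length == 3 then (acc.1, acc.2.1 + 1, acc.2.2)
        else if 4 ≤ length then (acc.1, acc.2.1, acc.2.2 + 1)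
        else acc)
      (a, b, c)
    = (a + ((sp.map pvLen).count 2 : Int),
       b + ((sp.map pvLen).count 3 : Int),
       c + ((sp.map pvLen).countP (fun n => decide (4 ≤ n)) : Int)) := by
  induction sp with
  | nil => intro a b c; simp
  | cons x t ih =>
    intro a b c
    simp only [List.foldl_cons, List.map_cons, List.count_cons, List.countP_cons]
    by_cases h2 : pvLen x = 2
    · simp only [pvLen] at h2
      simp only [h2]
      rw [show (((2:Int) == 2) = true) from rfl, if_pos rfl, ih]
      simp [pvLen, h2, Prod.ext_iff]
      ring
    · by_cases h3 : pvLen x = 3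
      · simp only [pvLen] at h2 h3
        simp only [h3]
        rw [show (((3:Int) == 2) = false) from rfl]
        simp only [Bool.false_eq_true, if_false]
        rw [show (((3:Int) == 3) = true) from rfl, if_pos rfl, ih]
        simp [pvLen, h3, Prod.ext_iff]
        ring
      · by_cases h4 : (4:Int) ≤ pvLen x
        · simp only [pvLen] at h2 h3 h4
          have e2 : (((PySem.Dict.mk x).getD "length" 0 : Int) == 2) = false := by
            simp [h2]
          have e3 : (((PySem.Dict.mk x).getD "length" 0 : Int) == 3) = false := by
            simp [h3]
          simp only [e2, e3, Bool.false_eq_true, if_false, if_pos h4]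
          rw [ih]
          simp [pvLen, h2, h3, h4, Prod.ext_iff]
          ring
        · simp only [pvLen] at h2 h3 h4
          have e2 : (((PySem.Dict.mk x).getD "length" 0 : Int) == 2) = false := by
            simp [h2]
          have e3 : (((PySem.Dict.mk x).getD "length" 0 : Int) == 3) = false := by
            simp [h3]
          simp only [e2, e3, Bool.false_eq_true, if_false, if_neg h4]
          rw [ih]
          simp [pvLen, h2, h3, h4]

-- B's tally loop builds Counter of the mapped length list.
theorem pvTally (sp : List (List (String × Int))) : ∀ (d : PySem.Dict Int Int),
    sp.foldl
      (fun (d : PySem.Dict Int Int) phrase =>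
        let k := (PySem.Dict.mk phrase).getD "length" 0
        d.insert k (d.getD k 0 + 1))
      d
    = (sp.map pvLen).foldl (fun d k => d.insert k (d.getD k 0 + 1)) d := by
  induction sp with
  | nil => intro d; simp
  | cons x t ih => intro d; simp only [List.foldl_cons, List.map_cons]; exact ih _

-- sum of (if j = x then 1 else 0) over a nodup list containing x
theorem pvSumIndicator (x : Int) : ∀ (d : List Int), d.Nodup → x ∈ d →
    ((d.map (fun j => if j = x then (1 : Int) else 0)).sum) = 1 := by
  intro d
  induction d with
  | nil => intro _ hx; cases hx
  | cons k t ih =>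
    intro hd hx
    simp only [List.map_cons, List.sum_cons]
    rcases List.mem_cons.mp hx with h | h
    · have hkt : k ∉ t := (List.nodup_cons.mp hd).1
      have hz : (t.map (fun j => if j = x then (1 : Int) else 0)).sum = 0 := by
        apply List.sum_eq_zero
        intro y hy
        rcases List.mem_map.mp hy with ⟨j, hj, rfl⟩
        have : j ≠ x := by
          intro e; rw [e, h] at hj; exact hkt hj
        simp [this]
      rw [h] at *
      simp [hz]
    · have hkx : k ≠ x := by
        intro e; exact (List.nodup_cons.mp hd).1 (e ▸ h)
      simp [hkx, ih (List.nodup_cons.mp hd).2 h]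

-- Σ over distinct keys (filtered by p) of the multiplicities = countP
theorem pvSumCounts (p : Int → Bool) (xs : List Int) : ∀ (d : List Int), d.Nodup → (∀ x ∈ xs, x ∈ d) →
    ((d.filter p).map (fun k => (xs.count k : Int))).sum = (xs.countP p : Int) := by
  induction xs with
  | nil => intro d _ _; simp
  | cons x t ih =>
    intro d hd hcov
    have hxd : x ∈ d := hcov x List.mem_cons_self
    have hcov' : ∀ y ∈ t, y ∈ d := fun y hy => hcov y (List.mem_cons_of_mem _ hy)
    have step : ((d.filter p).map (fun k => ((x :: t).count k : Int))).sum
        = ((d.filter p).map (fun k => (t.count k : Int))).sum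
          + ((d.filter p).map (fun k => if k = x then (1 : Int) else 0)).sum := by
      rw [← List.sum_map_add]
      congr 1
      apply List.map_congr_left
      intro k _
      simp only [List.count_cons]
      by_cases hk : k = x
      · simp [hk]
      · have hxk : ¬ x = k := fun e => hk e.symm
        simp [hk, hxk]
    rw [step, ih d hd hcov']
    by_cases hpx : p x = true
    · have hxf : x ∈ d.filter p := List.mem_filter.mpr ⟨hxd, hpx⟩
      rw [pvSumIndicator x (d.filter p) (hd.filter p) hxf]
      simp [hpx]
    · have hz : ((d.filter p).map (fun k => if k = x then (1 : Int) else 0)).sum = 0 := by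
        apply List.sum_eq_zero
        intro y hy
        rcases List.mem_map.mp hy with ⟨j, hj, rfl⟩
        have hj' : j ≠ x := by
          intro e; subst e
          exact hpx (List.mem_filter.mp hj).2
        simp [hj']
      rw [hz]
      simp [hpx]

-- B's if-guarded sum over the counter items
theorem pvItemsSum (xs : List Int) : ∀ (l : List Int) (a : Int),
    (l.map (fun k => (k, (xs.count k : Int)))).foldl
        (fun acc kv => if 4 ≤ kv.1 then acc + kv.2 else acc) a
      = a + ((l.filter (fun k => decide (4 ≤ k))).map (fun k => (xs.count k : Int))).sum := by
  intro l
  induction l with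
  | nil => intro a; simp
  | cons k t ih =>
    intro a
    simp only [List.map_cons, List.foldl_cons, List.filter_cons]
    by_cases hk : (4:Int) ≤ k
    · simp [hk, ih, add_assoc]
    · simp [hk, ih]

-- characterisations of the two ports
theorem pvA_eq (sp : List (List (String × Int))) :
    count_contiguous_phrases sp
      = (((sp.map pvLen).count 2 : Int), ((sp.map pvLen).count 3 : Int),
         ((sp.map pvLen).countP (fun n => decide (4 ≤ n)) : Int)) := by
  have := pvAFold sp 0 0 0
  simpa [count_contiguous_phrases] using this

theorem pvB_eq (sp : List (List (String × Int))) :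
    count_contiguous_phrases_alt sp
      = (((sp.map pvLen).count 2 : Int), ((sp.map pvLen).count 3 : Int),
         ((sp.map pvLen).countP (fun n => decide (4 ≤ n)) : Int)) := by
  unfold count_contiguous_phrases_alt
  rw [pvTally sp PySem.Dict.empty,
      PySem.Dict.foldl_insert_getD_add_one_eq_counter]
  show ((PySem.Dict.counter (sp.map pvLen)).getD 2 0,
        (PySem.Dict.counter (sp.map pvLen)).getD 3 0,
        (PySem.Dict.counter (sp.map pvLen)).items.foldl
          (fun acc kv => if 4 ≤ kv.1 then acc + kv.2 else acc) 0) = _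
  rw [PySem.Dict.getD_counter, PySem.Dict.getD_counter]
  rw [PySem.Dict.items_counter]
  rw [pvItemsSum (sp.map pvLen) (PySem.Set.ofList (sp.map pvLen)) 0, zero_add]
  rw [pvSumCounts (fun k => decide (4 ≤ k)) (sp.map pvLen) (PySem.Set.ofList (sp.map pvLen))
      (PySem.Set.nodup_ofList _) (fun x hx => (PySem.Set.mem_ofList _ x).mpr hx)]

-- ===== VERDICT (by name: the statement is the Claim_ definition above) =====
theorem count_contiguous_phrases_spec : Claim_equal_count_contiguous_phrases := by
  intro sp _
  show count_contiguous_phrases sp = count_contiguous_phrases_alt sp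
  rw [pvA_eq, pvB_eq]
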